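-- pv_equiv track=rewrite | github.com/michael-lazar/playscii | input_handler.py | parse_key_bind
-- ===== SOURCE A (Python) =====
-- def parse_key_bind(in_string):
--     "returns a tuple of (key, mod1, mod2) key bind data from given string"
--     shift = False
--     alt = False
--     ctrl = False
--     key = None
--     for i in in_string.split():
--         if i.lower() == 'shift':
--             shift = True
--         elif i.lower() == 'alt':
--             alt = True
--         elif i.lower() == 'ctrl':
--             ctrl = True
--         else:
--             key = i
--     return (key, shift, alt, ctrl)
-- ===== SOURCE B (Python) =====
-- def parse_key_bind(in_string):
--     "returns a tuple of (key, mod1, mod2) key bind data from given string"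
--     words = in_string.split()
--     low = [w.lower() for w in words]
--     shift = 'shift' in low
--     alt = 'alt' in low
--     ctrl = 'ctrl' in low
--     key = next((w for w in reversed(words)
--                 if w.lower() not in ('shift', 'alt', 'ctrl')), None)
--     return (key, shift, alt, ctrl)
-- ===== Notes on version B (the rewrite author's own statement) =====
-- stated objective: simpler
-- what changed: Replaces the single accumulator loop by independent derivations: each modifier flag is a membership test on the lowercased token list, and the key is the first non-modifier token found scanning from the right.
import Mathlib
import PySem

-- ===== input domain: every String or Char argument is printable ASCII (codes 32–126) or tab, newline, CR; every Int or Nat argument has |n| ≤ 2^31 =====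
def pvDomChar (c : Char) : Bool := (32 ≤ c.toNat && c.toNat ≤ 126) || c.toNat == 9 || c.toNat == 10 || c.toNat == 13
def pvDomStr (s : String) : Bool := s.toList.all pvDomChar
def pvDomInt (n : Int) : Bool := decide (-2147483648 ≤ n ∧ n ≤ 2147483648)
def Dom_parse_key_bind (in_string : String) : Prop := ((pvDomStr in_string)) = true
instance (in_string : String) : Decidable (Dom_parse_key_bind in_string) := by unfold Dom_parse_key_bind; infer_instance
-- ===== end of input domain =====

-- B derives each modifier flag by a membership test and picks the key by a right-to-left
-- scan for the first non-modifier token, instead of A's single accumulator loop (objective: simpler).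

-- ===== PORT A =====
-- A's loop body: one state update per token, branches in A's order.
def pvStepA (st : Option String × Bool × Bool × Bool) (i : String) :
    Option String × Bool × Bool × Bool :=
  if PySem.Str.lower i == "shift" then (st.1, true, st.2.2.1, st.2.2.2)
  else if PySem.Str.lower i == "alt" then (st.1, st.2.1, true, st.2.2.2)
  else if PySem.Str.lower i == "ctrl" then (st.1, st.2.1, st.2.2.1, true)
  else (some i, st.2.1, st.2.2.1, st.2.2.2)

def parse_key_bind (in_string : String) : Option String × Bool × Bool × Bool :=
  (PySem.Str.split₀ in_string).foldl pvStepA (none, false, false, false)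

-- ===== PORT B =====
def pvNonMod (w : String) : Bool :=
  !(PySem.Str.lower w == "shift" || PySem.Str.lower w == "alt" || PySem.Str.lower w == "ctrl")

def parse_key_bind_alt (in_string : String) : Option String × Bool × Bool × Bool :=
  let words := PySem.Str.split₀ in_string
  let low := words.map PySem.Str.lower
  let shift := low.contains "shift"
  let alt := low.contains "alt"
  let ctrl := low.contains "ctrl"
  let key := words.reverse.find? pvNonMod
  (key, shift, alt, ctrl)

-- ===== PRECONDITION & SPEC =====
def Spec_parse_key_bind (in_string : String) (out : Option String × Bool × Bool × Bool) : Prop := out = parse_key_bind_alt in_string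
instance (in_string : String) (out : Option String × Bool × Bool × Bool) : Decidable (Spec_parse_key_bind in_string out) := by unfold Spec_parse_key_bind; infer_instance

-- ===== CLAIM (what is proved, stated in full; the proofs are below) =====
def Claim_equal_parse_key_bind : Prop := ∀ (in_string : String), Dom_parse_key_bind in_string → Spec_parse_key_bind in_string (parse_key_bind in_string)

-- ===== LEMMAS AND PROOFS =====

lemma pkb_loop_eq (ws : List String) (k : Option String) (s a c : Bool) :
    ws.foldl pvStepA (k, s, a, c)
    = ((ws.reverse.find? pvNonMod).orElse (fun _ => k),
       s || (ws.map PySem.Str.lower).contains "shift",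
       a || (ws.map PySem.Str.lower).contains "alt",
       c || (ws.map PySem.Str.lower).contains "ctrl") := by
  induction ws generalizing k s a c with
  | nil => simp
  | cons w ws ih =>
    rw [List.foldl_cons]
    by_cases h1 : PySem.Str.lower w = "shift"
    · have step : pvStepA (k, s, a, c) w = (k, true, a, c) := by simp [pvStepA, h1]
      rw [step, ih]
      have hn : pvNonMod w = false := by simp [pvNonMod, h1]
      simp [List.find?_append, hn, h1]
    · by_cases h2 : PySem.Str.lower w = "alt"
      · have step : pvStepA (k, s, a, c) w = (k, s, true, c) := by simp [pvStepA, h2]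
        rw [step, ih]
        have hn : pvNonMod w = false := by simp [pvNonMod, h2]
        simp [List.find?_append, hn, h2]
      · by_cases h3 : PySem.Str.lower w = "ctrl"
        · have step : pvStepA (k, s, a, c) w = (k, s, a, true) := by
            simp [pvStepA, h3]
          rw [step, ih]
          have hn : pvNonMod w = false := by simp [pvNonMod, h3]
          simp [List.find?_append, hn, h3]
        · have step : pvStepA (k, s, a, c) w = (some w, s, a, c) := by
            simp [pvStepA, h1, h2, h3]
          rw [step, ih]
          have hn : pvNonMod w = true := by simp [pvNonMod, h1, h2, h3]
          simp [List.find?_append, hn, Ne.symm h1, Ne.symm h2, Ne.symm h3]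

-- ===== VERDICT (by name: the statement is the Claim_ definition above) =====
theorem parse_key_bind_spec : Claim_equal_parse_key_bind := by
  intro s _
  unfold Spec_parse_key_bind parse_key_bind parse_key_bind_alt
  rw [pkb_loop_eq]
  simp
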